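-- pv_equiv track=rewrite | github.com/avis001/PythPlayground | PyFiles/dsa_boot_camp/findSeriesOfNumbersInSortedArrayV1.py | findRightMost
-- ===== SOURCE A (Python) =====
-- def findRightMost(list, target, startI, endI, targetI=-1):
--     if startI > endI:
--         return targetI
--
--     if startI == endI:
--         return startI if list[startI] == target else targetI
--
--     offset = endI - startI
--     pivot = startI + offset // 2
--
--     if list[pivot] == target:
--         targetI = pivot
--         return findRightMost(list, target, pivot + 1, endI, targetI)
--
--     if list[pivot] > target:
--         return findRightMost(list, target, startI, pivot - 1, targetI)
--     else:
--         return findRightMost(list, target, pivot + 1, endI, targetI)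
-- ===== SOURCE B (Python) =====
-- def findRightMost(list, target, startI, endI, targetI=-1):
--     while startI < endI:
--         pivot = (startI + endI) // 2
--         if list[pivot] > target:
--             endI = pivot - 1
--         else:
--             if list[pivot] == target:
--                 targetI = pivot
--             startI = pivot + 1
--     if startI == endI and list[startI] == target:
--         return startI
--     return targetI
-- ===== Notes on version B (the rewrite author's own statement) =====
-- stated objective: idiomatic
-- what changed: A's four-way tail recursion is replaced by the textbook iterative rightmost binary search: a strict `while startI < endI` loop with midpoint (startI+endI)//2, a merged equal/less branch, and the single-element check moved after the loop.
-- outside the precondition, e.g. on findRightMost([5], 3, 0, 1, -1): A returns -1, B returns -1; on findRightMost([1, 2, 3], 1, -5, 0, -1): A returns -3, B returns -3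
import Mathlib
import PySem

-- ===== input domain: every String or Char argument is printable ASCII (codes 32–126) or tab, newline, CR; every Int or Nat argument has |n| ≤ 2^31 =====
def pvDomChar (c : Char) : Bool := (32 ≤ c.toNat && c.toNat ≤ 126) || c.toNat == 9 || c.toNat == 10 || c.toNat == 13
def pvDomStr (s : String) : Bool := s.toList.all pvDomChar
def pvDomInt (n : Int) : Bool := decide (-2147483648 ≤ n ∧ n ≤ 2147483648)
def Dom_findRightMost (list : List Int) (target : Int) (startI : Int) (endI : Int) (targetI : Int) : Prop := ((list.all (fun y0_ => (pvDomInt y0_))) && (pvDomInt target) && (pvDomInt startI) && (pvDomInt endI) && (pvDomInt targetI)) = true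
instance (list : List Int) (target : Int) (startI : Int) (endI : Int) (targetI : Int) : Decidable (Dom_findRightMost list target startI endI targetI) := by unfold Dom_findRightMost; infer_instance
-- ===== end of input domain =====

-- B replaces A's four-way tail recursion by the textbook iterative rightmost binary search:
-- a strict `while startI < endI` loop with midpoint (startI+endI)//2, a merged equal/less
-- branch, and the single-element check moved after the loop; return values are identical.

-- ===== PORT A =====
-- Literal port of A's recursion, with a fuel counter as totality guard only: each recursive
-- call shrinks endI - startI by at least 1, so (endI - startI).toNat + 1 steps never run out.
-- 'none' from pyGet? is Python's IndexError, unreachable under Pre_findRightMost; totalised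
-- by returning targetI.
def findRightMostFuel (fuel : Nat) (list : List Int) (target : Int) (startI : Int) (endI : Int) (targetI : Int) : Int :=
  match fuel with
  | 0 => targetI
  | Nat.succ f =>
    if startI > endI then targetI
    else if startI = endI then
      match PySem.List.pyGet? list startI with
      | none => targetI
      | some v => if v = target then startI else targetI
    else
      let offset := endI - startI
      let pivot := startI + PySem.Int.floordiv offset 2
      match PySem.List.pyGet? list pivot with
      | none => targetI
      | some v =>
        if v = target then findRightMostFuel f list target (pivot + 1) endI pivot
        else if v > target then findRightMostFuel f list target startI (pivot - 1) targetI
        else findRightMostFuel f list target (pivot + 1) endI targetI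

def findRightMost (list : List Int) (target : Int) (startI : Int) (endI : Int) (targetI : Int) : Int :=
  findRightMostFuel ((endI - startI).toNat + 1) list target startI endI targetI

-- ===== PORT B =====
-- Literal port of B's `while startI < endI` loop: a tail-recursive state function returning
-- the final (startI, endI, targetI) triple (fuel as totality guard; each iteration shrinks
-- endI - startI by at least 1). 'none' from pyGet? is Python's IndexError, unreachable under
-- Pre_findRightMost; totalised by stopping the loop with the current state.
def findRightMostGo (fuel : Nat) (list : List Int) (target : Int) (s : Int) (e : Int) (ti : Int) : Int × Int × Int :=
  match fuel with
  | 0 => (s, e, ti)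
  | Nat.succ f =>
    if s < e then
      let pivot := PySem.Int.floordiv (s + e) 2
      match PySem.List.pyGet? list pivot with
      | none => (s, e, ti)
      | some v =>
        if v > target then findRightMostGo f list target s (pivot - 1) ti
        else if v = target then findRightMostGo f list target (pivot + 1) e pivot
        else findRightMostGo f list target (pivot + 1) e ti
    else (s, e, ti)

-- the two lines after B's loop: `if startI == endI and list[startI] == target: return startI`,
-- `return targetI` (an IndexError here is likewise unreachable under Pre_; totalised with targetI)
def findRightMostFinish (list : List Int) (target : Int) (st : Int × Int × Int) : Int :=
  if st.1 = st.2.1 then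
    match PySem.List.pyGet? list st.1 with
    | none => st.2.2
    | some v => if v = target then st.1 else st.2.2
  else st.2.2

def findRightMost_alt (list : List Int) (target : Int) (startI : Int) (endI : Int) (targetI : Int) : Int :=
  findRightMostFinish list target (findRightMostGo ((endI - startI).toNat + 1) list target startI endI targetI)

-- ===== PRECONDITION & SPEC =====
-- Pre_ excludes calls with startI ≤ endI whose range reaches outside [-len(list), len(list)):
-- Python raises IndexError on almost all of them, and on the few where the search shrinks back
-- into range before touching a bad index (or wraps a negative index) A and B still behave
-- identically, so nothing of substance is excluded.
def Pre_findRightMost (list : List Int) (target : Int) (startI : Int) (endI : Int) (targetI : Int) : Prop :=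
  startI > endI ∨ (-(list.length : Int) ≤ startI ∧ endI < (list.length : Int))
instance (list : List Int) (target : Int) (startI : Int) (endI : Int) (targetI : Int) : Decidable (Pre_findRightMost list target startI endI targetI) := by unfold Pre_findRightMost; infer_instance
def pvWitness_findRightMost : List Int × Int × Int × Int × Int := ([1, 3, 3, 5], 3, 0, 3, -1)

def Spec_findRightMost (list : List Int) (target : Int) (startI : Int) (endI : Int) (targetI : Int) (out : Int) : Prop := out = findRightMost_alt list target startI endI targetI
instance (list : List Int) (target : Int) (startI : Int) (endI : Int) (targetI : Int) (out : Int) : Decidable (Spec_findRightMost list target startI endI targetI out) := by unfold Spec_findRightMost; infer_instance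

-- ===== CLAIM =====
def Claim_equal_findRightMost : Prop := ∀ (list : List Int) (target : Int) (startI : Int) (endI : Int) (targetI : Int), Dom_findRightMost list target startI endI targetI → Pre_findRightMost list target startI endI targetI → Spec_findRightMost list target startI endI targetI (findRightMost list target startI endI targetI)

-- ===== LEMMAS AND PROOFS =====

-- the two midpoint formulas coincide: (s+e)//2 = s + (e-s)//2 (floor division, s an integer)
theorem pivot_eq (s e : Int) : PySem.Int.floordiv (s + e) 2 = s + PySem.Int.floordiv (e - s) 2 := by
  rw [PySem.Int.floordiv_eq_ediv_of_pos (by omega), PySem.Int.floordiv_eq_ediv_of_pos (by omega)]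
  omega

-- with enough fuel, A's recursion equals B's loop followed by B's post-loop check
-- (Pre_ is not needed for the equality: the IndexError defaults also agree).
theorem fuel_eq (fuel : Nat) : ∀ (list : List Int) (target s e ti : Int), (e - s).toNat < fuel →
    findRightMostFuel fuel list target s e ti
      = findRightMostFinish list target (findRightMostGo fuel list target s e ti) := by
  induction fuel with
  | zero => intro _ _ _ _ _ h; omega
  | succ f ih =>
    intro list target s e ti hfuel
    rw [findRightMostFuel, findRightMostGo]
    by_cases h1 : s > e
    · rw [if_pos h1, if_neg (by omega : ¬ s < e)]
      simp only [findRightMostFinish, if_neg (by omega : ¬ s = e)]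
    · rw [if_neg h1]
      by_cases h2 : s = e
      · rw [if_pos h2, if_neg (by omega : ¬ s < e)]
        simp only [findRightMostFinish, if_pos h2]
      · rw [if_neg h2, if_pos (by omega : s < e)]
        have hp := pivot_eq s e
        have hb1 : 0 ≤ PySem.Int.floordiv (e - s) 2 := by
          rw [PySem.Int.floordiv_eq_ediv_of_pos (by omega)]; omega
        have hb2 : PySem.Int.floordiv (e - s) 2 ≤ e - s - 1 := by
          rw [PySem.Int.floordiv_eq_ediv_of_pos (by omega)]; omega
        rw [hp]
        cases hget : PySem.List.pyGet? list (s + PySem.Int.floordiv (e - s) 2) with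
        | none =>
          simp only [hget, findRightMostFinish, if_neg (by omega : ¬ s = e)]
        | some v =>
          simp only [hget]
          by_cases hv : v = target
          · simp only [if_pos hv, if_neg (by omega : ¬ v > target)]
            exact ih list target _ e _ (by omega)
          · by_cases hlt : v > target
            · simp only [if_neg hv, if_pos hlt]
              exact ih list target s _ ti (by omega)
            · simp only [if_neg hv, if_neg hlt]
              exact ih list target _ e ti (by omega)

-- ===== VERDICT =====
theorem findRightMost_spec : Claim_equal_findRightMost := by
  intro list target startI endI targetI _ _
  unfold Spec_findRightMost findRightMost findRightMost_alt
  exact fuel_eq _ list target startI endI targetI (by omega)
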